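-- pv_equiv track=rewrite | github.com/makhidkarun/traveller_pyroute | PyRoute/DeltaDebug.py | partition_file
-- ===== SOURCE A (Python) =====
-- def partition_file(lines):
--     """
--         Break lines out into headers section, which is retained, and starlines, which gets minimised - this assumes
--         downloaded-from-TravellerMap sector file
--     """
--     headers = []
--     starlines = []
--     isheader = True
--     for line in lines:
--         if isheader:
--             headers.append(line)
--             if line.startswith('----'):
--                 isheader = False
--         else:
--             starlines.append(line)
--     return headers, starlines
-- ===== SOURCE B (Python) =====
-- def partition_file(lines):
--     idx = next((i for i, line in enumerate(lines) if line.startswith('----')), None)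
--     if idx is None:
--         return list(lines), []
--     return lines[:idx + 1], lines[idx + 1:]
-- ===== Notes on version B (the rewrite author's own statement) =====
-- stated objective: simpler
-- what changed: Finds the first '----' delimiter index and slices the list there, instead of looping with an isheader flag that appends each line to one of two accumulators.
import Mathlib
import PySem

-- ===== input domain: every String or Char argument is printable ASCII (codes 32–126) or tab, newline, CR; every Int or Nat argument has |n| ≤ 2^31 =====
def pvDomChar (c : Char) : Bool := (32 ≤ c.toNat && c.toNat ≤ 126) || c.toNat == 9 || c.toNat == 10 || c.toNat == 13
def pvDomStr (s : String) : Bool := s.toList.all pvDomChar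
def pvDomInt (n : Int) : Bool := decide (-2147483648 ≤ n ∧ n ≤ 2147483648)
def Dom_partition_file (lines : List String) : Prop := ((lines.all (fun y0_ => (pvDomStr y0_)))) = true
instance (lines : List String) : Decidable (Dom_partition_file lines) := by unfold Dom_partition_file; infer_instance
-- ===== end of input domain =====

-- B finds the first '----' delimiter index and slices, instead of A's isheader-flag loop; objective: simpler.


-- ===== PORT A =====
-- the for-loop's state: (headers, starlines, isheader)
def partition_file_step (st : List String × List String × Bool) (line : String) :
    List String × List String × Bool :=
  if st.2.2 then
    (st.1 ++ [line], st.2.1, !(PySem.Str.startswith line "----"))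
  else
    (st.1, st.2.1 ++ [line], st.2.2)

def partition_file (lines : List String) : List String × List String :=
  let st := lines.foldl partition_file_step ([], [], true)
  (st.1, st.2.1)

-- ===== PORT B =====
def partition_file_alt (lines : List String) : List String × List String :=
  match lines.findIdx? (fun line => PySem.Str.startswith line "----") with
  | none => (lines, [])
  | some i => (lines.take (i + 1), lines.drop (i + 1))

-- ===== PRECONDITION & SPEC =====
def Spec_partition_file (lines : List String) (out : List String × List String) : Prop := out = partition_file_alt lines
instance (lines : List String) (out : List String × List String) : Decidable (Spec_partition_file lines out) := by unfold Spec_partition_file; infer_instance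

-- ===== CLAIM (what is proved, stated in full; the proofs are below) =====
def Claim_equal_partition_file : Prop := ∀ (lines : List String), Dom_partition_file lines → Spec_partition_file lines (partition_file lines)

-- ===== LEMMAS AND PROOFS =====

-- once isheader is false, the loop only appends to starlines
theorem partition_file_foldl_false (lines : List String) : ∀ (h s : List String),
    lines.foldl partition_file_step (h, s, false) = (h, s ++ lines, false) := by
  induction lines with
  | nil => simp
  | cons l rest ih =>
      intro h s
      simp [List.foldl_cons, partition_file_step, ih]

-- invariant of the header-scanning phase, relating it to findIdx?-and-slice
theorem partition_file_foldl_true (lines : List String) : ∀ h : List String,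
    (let st := lines.foldl partition_file_step (h, [], true); (st.1, st.2.1)) =
    (match lines.findIdx? (fun line => PySem.Str.startswith line "----") with
     | none => (h ++ lines, [])
     | some i => (h ++ lines.take (i + 1), lines.drop (i + 1))) := by
  induction lines with
  | nil => simp
  | cons l rest ih =>
      intro h
      by_cases hp : PySem.Str.startswith l "----"
      all_goals
        simp only [PySem.Str.startswith, show "----".toList = ['-','-','-','-'] from rfl] at hp
      · simp [List.foldl_cons, partition_file_step, hp, List.findIdx?_cons,
              PySem.Str.startswith, show "----".toList = ['-','-','-','-'] from rfl,
              partition_file_foldl_false]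
      · have hmain := ih (h ++ [l])
        simp only [List.foldl_cons, partition_file_step, hp, PySem.Str.startswith,
          show "----".toList = ['-','-','-','-'] from rfl,
          Bool.not_false, if_true] at hmain ⊢
        rw [hmain]
        simp only [List.findIdx?_cons, hp, if_false, Bool.false_eq_true]
        cases hf : rest.findIdx? (fun line => PySem.Chars.startswith line.toList ['-','-','-','-']) with
        | none => simp
        | some i => simp [List.take_succ_cons, List.drop_succ_cons]

-- ===== VERDICT (by name: the statement is the Claim_ definition above) =====
theorem partition_file_spec : Claim_equal_partition_file := by
  intro lines _
  unfold Spec_partition_file partition_file partition_file_alt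
  have := partition_file_foldl_true lines []
  simp only [List.nil_append] at this
  rw [this]
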